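-- pv_equiv track=rewrite | github.com/oVirt/ovirt-engine | packaging/setup/plugins/ovirt-engine-setup/ovirt-engine-common/apache/ssl.py | _apply_logging
-- ===== SOURCE A (Python) =====
-- _SSL_REQUESTS_LOG_FORMAT = (
--     'CustomLog logs/ovirt-requests-log '
--     ' "%t %h \\"Correlation-Id: %{Correlation-Id}o\\" '
--     '\\"Duration: %Dus\\" \\"%r\\" %b" '
--     '"expr=%{QUERY_STRING} !~ /username.*password|password.*username/"'
-- )
--
-- def _apply_logging(lines):
--     result = []
--     found = False
--     for line in lines:
--         if not found and line.find('ovirt-requests-log') != -1: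
--             found = True
--         if not found and line.find('</VirtualHost>') != -1:
--             found = True
--             result.append(_SSL_REQUESTS_LOG_FORMAT)
--         result.append(line)
--     return result
-- ===== SOURCE B (Python) =====
-- _SSL_REQUESTS_LOG_FORMAT = (
--     'CustomLog logs/ovirt-requests-log '
--     ' "%t %h \\"Correlation-Id: %{Correlation-Id}o\\" '
--     '\\"Duration: %Dus\\" \\"%r\\" %b" '
--     '"expr=%{QUERY_STRING} !~ /username.*password|password.*username/"'
-- )
--
--
-- def _apply_logging(lines):
--     lines = list(lines)
--     for i, line in enumerate(lines):
--         if line.find('ovirt-requests-log') != -1: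
--             return lines
--         if line.find('</VirtualHost>') != -1:
--             return lines[:i] + [_SSL_REQUESTS_LOG_FORMAT] + lines[i:]
--     return lines
-- ===== Notes on version B (the rewrite author's own statement) =====
-- stated objective: alternative
-- what changed: Replaces the found-flag accumulator that re-appends every line with a locate-the-first-marker-and-splice decomposition: find the first line containing either marker, return the list unchanged if it is the log marker, otherwise splice the format line in before it.
import Mathlib
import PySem

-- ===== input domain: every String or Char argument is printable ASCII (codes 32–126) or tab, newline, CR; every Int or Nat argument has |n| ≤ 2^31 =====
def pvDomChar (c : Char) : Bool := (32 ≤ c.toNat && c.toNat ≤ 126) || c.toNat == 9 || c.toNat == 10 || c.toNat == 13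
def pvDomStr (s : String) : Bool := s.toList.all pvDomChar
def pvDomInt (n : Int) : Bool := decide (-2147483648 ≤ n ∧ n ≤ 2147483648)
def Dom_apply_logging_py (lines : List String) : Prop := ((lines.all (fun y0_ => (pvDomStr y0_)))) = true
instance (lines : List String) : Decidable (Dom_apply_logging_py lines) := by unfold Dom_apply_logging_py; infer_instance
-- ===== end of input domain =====

-- B replaces A's found-flag accumulator loop by locating the first marker line and splicing; same result, alternative decomposition.

-- ===== PORT A =====
def pvFmt : String := "CustomLog logs/ovirt-requests-log  \"%t %h \\\"Correlation-Id: %{Correlation-Id}o\\\" \\\"Duration: %Dus\\\" \\\"%r\\\" %b\" \"expr=%{QUERY_STRING} !~ /username.*password|password.*username/\""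

-- loop body of A's for-loop (result/found state)
def pvStep (st : List String × Bool) (line : String) : List String × Bool :=
  let found := if st.2 = false ∧ PySem.Str.find line "ovirt-requests-log" ≠ -1 then true else st.2
  if found = false ∧ PySem.Str.find line "</VirtualHost>" ≠ -1 then
    (st.1 ++ [pvFmt] ++ [line], true)
  else
    (st.1 ++ [line], found)

def apply_logging_py (lines : List String) : List String :=
  (lines.foldl pvStep ([], false)).1

-- ===== PORT B =====
-- the enumerate loop: first line containing a marker decides (return unchanged / splice before index i)
def pvAltGo (lines : List String) : List (Int × String) → List String
  | [] => lines
  | (i, line) :: rest =>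
    if PySem.Str.find line "ovirt-requests-log" ≠ -1 then lines
    else if PySem.Str.find line "</VirtualHost>" ≠ -1 then
      PySem.List.slice lines none (some i) ++ [pvFmt] ++ PySem.List.slice lines (some i) none
    else pvAltGo lines rest

def apply_logging_py_alt (lines : List String) : List String :=
  pvAltGo lines (PySem.List.enumerate lines)

-- ===== PRECONDITION & SPEC =====
def Spec_apply_logging_py (lines : List String) (out : List String) : Prop := out = apply_logging_py_alt lines
instance (lines : List String) (out : List String) : Decidable (Spec_apply_logging_py lines out) := by unfold Spec_apply_logging_py; infer_instance

-- ===== CLAIM (what is proved, stated in full; the proofs are below) =====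
def Claim_equal_apply_logging_py : Prop := ∀ (lines : List String), Dom_apply_logging_py lines → Spec_apply_logging_py lines (apply_logging_py lines)

-- ===== LEMMAS AND PROOFS =====

-- common reference function: both ports compute this
def pvRef : List String → List String
  | [] => []
  | l :: ls =>
    if PySem.Str.find l "ovirt-requests-log" ≠ -1 then l :: ls
    else if PySem.Str.find l "</VirtualHost>" ≠ -1 then pvFmt :: l :: ls
    else l :: pvRef ls

theorem pvFoldl_found (ls : List String) (acc : List String) :
    ls.foldl pvStep (acc, true) = (acc ++ ls, true) := by
  induction ls generalizing acc with
  | nil => simp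
  | cons l ls ih => simp [pvStep, ih]

theorem pvStep_req (st : List String × Bool) (line : String)
    (h0 : st.2 = false) (h1 : PySem.Str.find line "ovirt-requests-log" ≠ -1) :
    pvStep st line = (st.1 ++ [line], true) := by
  simp only [pvStep]
  have hf : (if st.2 = false ∧ PySem.Str.find line "ovirt-requests-log" ≠ -1
      then true else st.2) = true := if_pos ⟨h0, h1⟩
  rw [hf, if_neg (fun h => Bool.noConfusion h.1)]

theorem pvStep_vh (st : List String × Bool) (line : String)
    (h0 : st.2 = false) (h1 : ¬ PySem.Str.find line "ovirt-requests-log" ≠ -1)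
    (h2 : PySem.Str.find line "</VirtualHost>" ≠ -1) :
    pvStep st line = (st.1 ++ [pvFmt] ++ [line], true) := by
  simp only [pvStep]
  have hf : (if st.2 = false ∧ PySem.Str.find line "ovirt-requests-log" ≠ -1
      then true else st.2) = st.2 := if_neg (fun h => h1 h.2)
  rw [hf, if_pos ⟨h0, h2⟩]

theorem pvStep_none (st : List String × Bool) (line : String)
    (h1 : ¬ PySem.Str.find line "ovirt-requests-log" ≠ -1)
    (h2 : ¬ PySem.Str.find line "</VirtualHost>" ≠ -1) :
    pvStep st line = (st.1 ++ [line], st.2) := by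
  simp only [pvStep]
  have hf : (if st.2 = false ∧ PySem.Str.find line "ovirt-requests-log" ≠ -1
      then true else st.2) = st.2 := if_neg (fun h => h1 h.2)
  rw [hf, if_neg (fun h => h2 h.2)]

theorem pvA_eq_ref (ls : List String) (acc : List String) :
    (ls.foldl pvStep (acc, false)).1 = acc ++ pvRef ls := by
  induction ls generalizing acc with
  | nil => simp [pvRef]
  | cons l ls ih =>
    rw [List.foldl_cons, pvRef]
    by_cases h1 : PySem.Str.find l "ovirt-requests-log" ≠ -1
    · rw [pvStep_req (acc, false) l rfl h1, pvFoldl_found, if_pos h1]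
      simp
    · by_cases h2 : PySem.Str.find l "</VirtualHost>" ≠ -1
      · rw [pvStep_vh (acc, false) l rfl h1 h2, pvFoldl_found, if_neg h1, if_pos h2]
        simp
      · rw [pvStep_none (acc, false) l h1 h2, if_neg h1, if_neg h2]
        exact (ih (acc ++ [l])).trans (by simp)

theorem pvB_eq_ref (suf : List String) (pre : List String) :
    pvAltGo (pre ++ suf) (PySem.List.enumerate suf (pre.length : Int)) = pre ++ pvRef suf := by
  induction suf generalizing pre with
  | nil => simp [PySem.List.enumerate_nil, pvAltGo, pvRef]
  | cons l ls ih =>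
    rw [PySem.List.enumerate_cons, pvAltGo, pvRef]
    by_cases h1 : PySem.Str.find l "ovirt-requests-log" ≠ -1
    · rw [if_pos h1, if_pos h1]
    · by_cases h2 : PySem.Str.find l "</VirtualHost>" ≠ -1
      · rw [if_neg h1, if_pos h2, if_neg h1, if_pos h2]
        simp [PySem.List.slice_to_natCast, PySem.List.slice_from_natCast]
      · rw [if_neg h1, if_neg h2, if_neg h1, if_neg h2]
        have hsplit : pre ++ l :: ls = (pre ++ [l]) ++ ls := by simp
        have hlen : (pre.length : Int) + 1 = ((pre ++ [l]).length : Int) := by simp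
        rw [hsplit, hlen, ih (pre ++ [l])]
        simp

-- ===== VERDICT (by name: the statement is the Claim_ definition above) =====
theorem apply_logging_py_spec : Claim_equal_apply_logging_py := by
  intro lines _
  show apply_logging_py lines = apply_logging_py_alt lines
  have hA : apply_logging_py lines = pvRef lines := by
    simpa [apply_logging_py] using pvA_eq_ref lines []
  have hB : apply_logging_py_alt lines = pvRef lines := by
    simpa [apply_logging_py_alt] using pvB_eq_ref lines []
  rw [hA, hB]
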